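-- pv_equiv track=rewrite | github.com/stagepalete2/levone-back-v4 | apps/tenant/delivery/core.py | get_segment_ranges
-- ===== SOURCE A (Python) =====
-- def get_segment_ranges(segments):
--     """Извлекает примеры сегментов для заголовков таблицы"""
--     ranges = {
--         'f1': None, 'f2': None, 'f3': None,
--         'r3': None, 'r2': None, 'r1': None, 'r0': None
--     }
--
--     for seg in segments:
--         code = seg['code']
--
--         if code == 'R3F1':
--             ranges['f1'] = seg
--             ranges['r3'] = seg
--         elif code == 'R3F2':
--             ranges['f2'] = seg
--         elif code == 'R3F3':
--             ranges['f3'] = seg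
--         elif code == 'R2F1':
--             ranges['r2'] = seg
--         elif code == 'R1F1':
--             ranges['r1'] = seg
--         elif code == 'R0F1':
--             ranges['r0'] = seg
--
--     return ranges
-- ===== SOURCE B (Python) =====
-- def get_segment_ranges(segments):
--     """Извлекает примеры сегментов для заголовков таблицы"""
--     # For each slot, take the LAST segment carrying the code that fills it.
--     slot_codes = [('f1', 'R3F1'), ('f2', 'R3F2'), ('f3', 'R3F3'),
--                   ('r3', 'R3F1'), ('r2', 'R2F1'), ('r1', 'R1F1'), ('r0', 'R0F1')]
--     rev = list(reversed(segments))
--     return {slot: next((s for s in rev if s['code'] == code), None)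
--             for slot, code in slot_codes}
-- ===== Notes on version B (the rewrite author's own statement) =====
-- stated objective: alternative
-- what changed: Replaces A's forward pass that mutates a seven-slot dict through an if/elif chain with a per-slot backward search: each slot is filled directly with the last segment whose code maps to it, via a slot->code table and next() over reversed(segments).
-- outside the precondition, e.g. on get_segment_ranges([{'kode': 'R3F1'}]): A raises KeyError, B raises KeyError
import Mathlib
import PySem

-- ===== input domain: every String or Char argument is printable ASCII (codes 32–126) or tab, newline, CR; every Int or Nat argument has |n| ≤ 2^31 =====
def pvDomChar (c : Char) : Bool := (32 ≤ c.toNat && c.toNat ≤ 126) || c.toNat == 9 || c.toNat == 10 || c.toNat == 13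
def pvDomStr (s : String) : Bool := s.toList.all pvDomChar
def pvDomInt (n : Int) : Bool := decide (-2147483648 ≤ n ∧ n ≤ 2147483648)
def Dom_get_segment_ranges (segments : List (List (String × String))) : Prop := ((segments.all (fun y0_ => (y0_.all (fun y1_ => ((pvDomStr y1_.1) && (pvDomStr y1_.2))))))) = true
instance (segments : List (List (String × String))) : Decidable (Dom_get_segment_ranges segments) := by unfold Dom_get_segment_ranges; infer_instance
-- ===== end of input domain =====

-- B replaces A's forward pass mutating a dict with, per slot, a backward search for the
-- last segment carrying the slot's code (objective: alternative decomposition, same cost).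

-- ===== PORT A =====
-- seg['code'] : first match in the association list (KeyError excluded by Pre_; default "" never compares equal to a code)
def pvCodeOf (seg : List (String × String)) : String := (seg.lookup "code").getD ""

def pvStepA (r : PySem.Dict String (Option (List (String × String)))) (seg : List (String × String)) :
    PySem.Dict String (Option (List (String × String))) :=
  let code := pvCodeOf seg
  if code = "R3F1" then (r.insert "f1" (some seg)).insert "r3" (some seg)
  else if code = "R3F2" then r.insert "f2" (some seg)
  else if code = "R3F3" then r.insert "f3" (some seg)
  else if code = "R2F1" then r.insert "r2" (some seg)
  else if code = "R1F1" then r.insert "r1" (some seg)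
  else if code = "R0F1" then r.insert "r0" (some seg)
  else r

def get_segment_ranges (segments : List (List (String × String))) : List (String × Option (List (String × String))) :=
  let ranges : PySem.Dict String (Option (List (String × String))) :=
    PySem.Dict.mk [("f1", none), ("f2", none), ("f3", none),
                   ("r3", none), ("r2", none), ("r1", none), ("r0", none)]
  (segments.foldl pvStepA ranges).items

-- ===== PORT B =====
-- next((s for s in rev if s['code'] == code), None)
def pvLastWith (rev : List (List (String × String))) (code : String) : Option (List (String × String)) :=
  rev.find? (fun s => pvCodeOf s == code)

def get_segment_ranges_alt (segments : List (List (String × String))) : List (String × Option (List (String × String))) :=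
  let rev := segments.reverse
  [("f1", pvLastWith rev "R3F1"), ("f2", pvLastWith rev "R3F2"), ("f3", pvLastWith rev "R3F3"),
   ("r3", pvLastWith rev "R3F1"), ("r2", pvLastWith rev "R2F1"), ("r1", pvLastWith rev "R1F1"),
   ("r0", pvLastWith rev "R0F1")]

-- ===== PRECONDITION & SPEC =====
-- Pre_ excludes only segments lacking a 'code' key, on which the Python A raises KeyError.
def Pre_get_segment_ranges (segments : List (List (String × String))) : Prop :=
  ∀ seg ∈ segments, "code" ∈ seg.map Prod.fst
instance (segments : List (List (String × String))) : Decidable (Pre_get_segment_ranges segments) := by unfold Pre_get_segment_ranges; infer_instance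

def pvWitness_get_segment_ranges : (List (List (String × String))) :=
  [[("code", "R3F1"), ("v", "a")], [("code", "R2F1")], [("code", "ZZ")]]

def Spec_get_segment_ranges (segments : List (List (String × String))) (out : List (String × Option (List (String × String)))) : Prop := out = get_segment_ranges_alt segments
instance (segments : List (List (String × String))) (out : List (String × Option (List (String × String)))) : Decidable (Spec_get_segment_ranges segments out) := by unfold Spec_get_segment_ranges; infer_instance

-- ===== CLAIM (what is proved, stated in full; the proofs are below) =====
def Claim_equal_get_segment_ranges : Prop := ∀ (segments : List (List (String × String))), Dom_get_segment_ranges segments → Pre_get_segment_ranges segments → Spec_get_segment_ranges segments (get_segment_ranges segments)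

-- ===== LEMMAS AND PROOFS =====

-- last-matching segment over an appended element
theorem pvLastWith_append (segs : List (List (String × String))) (s : List (String × String)) (c : String) :
    pvLastWith (segs ++ [s]).reverse c
      = if pvCodeOf s = c then some s else pvLastWith segs.reverse c := by
  simp only [List.reverse_append, List.reverse_singleton, List.singleton_append, pvLastWith,
    List.find?]
  by_cases h : pvCodeOf s = c
  · simp [h]
  · rw [if_neg h, show (pvCodeOf s == c) = false from beq_eq_false_iff_ne.mpr h]

-- invariant: A's fold is exactly the seven last-match lookups
theorem pvFold_eq (segs : List (List (String × String))) :
    segs.foldl pvStepA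
        (PySem.Dict.mk [("f1", none), ("f2", none), ("f3", none),
                        ("r3", none), ("r2", none), ("r1", none), ("r0", none)])
      = PySem.Dict.mk
          [("f1", pvLastWith segs.reverse "R3F1"), ("f2", pvLastWith segs.reverse "R3F2"),
           ("f3", pvLastWith segs.reverse "R3F3"), ("r3", pvLastWith segs.reverse "R3F1"),
           ("r2", pvLastWith segs.reverse "R2F1"), ("r1", pvLastWith segs.reverse "R1F1"),
           ("r0", pvLastWith segs.reverse "R0F1")] := by
  induction segs using List.reverseRecOn with
  | nil => rfl
  | append_singleton segs s ih =>
      rw [List.foldl_append, ih]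
      simp only [List.foldl_cons, List.foldl_nil, pvLastWith_append]
      generalize pvLastWith segs.reverse "R3F1" = v1
      generalize pvLastWith segs.reverse "R3F2" = v2
      generalize pvLastWith segs.reverse "R3F3" = v3
      generalize pvLastWith segs.reverse "R2F1" = v4
      generalize pvLastWith segs.reverse "R1F1" = v5
      generalize pvLastWith segs.reverse "R0F1" = v6
      simp only [pvStepA]
      split_ifs <;> simp_all [PySem.Dict.insert, PySem.Dict.contains]

theorem get_segment_ranges_spec : Claim_equal_get_segment_ranges := by
  intro segments _ _
  show get_segment_ranges segments = get_segment_ranges_alt segments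
  rw [get_segment_ranges, get_segment_ranges_alt, pvFold_eq]
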